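-- pv_equiv track=rewrite | github.com/MastewalB/a2sv-competitive-programming | Contest/Camp-Contest/Team-Contest/1/E.py | constanze
-- ===== SOURCE A (Python) =====
-- def constanze(s):
--     arr = [1] * (len(s) + 1)
--     MOD = pow(10, 9) + 7
--     for val in s:
--         if val == 'm' or val == 'w':
--             return 0
--     for i in range(2, len(s) + 1):
--
--         if s[i - 2:i] == 'nn' or s[i - 2:i] == 'uu':
--             arr[i] = (arr[i - 1] + arr[i - 2]) % MOD
--         else:
--             arr[i] = arr[i - 1]
--
--     return arr[len(s)]
-- ===== SOURCE B (Python) =====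
-- def constanze(s):
--     MOD = 10 ** 9 + 7
--     if 'm' in s or 'w' in s:
--         return 0
--     ans = 1
--     i = 0
--     n = len(s)
--     while i < n:
--         j = i + 1
--         while j < n and s[j] == s[i]:
--             j += 1
--         if s[i] == 'n' or s[i] == 'u':
--             a, b = 1, 1
--             for _ in range(j - i - 1):
--                 a, b = b, (a + b) % MOD
--             ans = ans * b % MOD
--         i = j
--     return ans
-- ===== Notes on version B (the rewrite author's own statement) =====
-- stated objective: faster
-- what changed: Replaces A's length-(n+1) DP array driven by per-index two-character string slices with a single run-segmentation pass: each maximal run of equal decodable-letter characters contributes a closed-form Fibonacci tiling factor multiplied into the answer mod 1e9+7, so no array and no slice objects are built.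
import Mathlib
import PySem

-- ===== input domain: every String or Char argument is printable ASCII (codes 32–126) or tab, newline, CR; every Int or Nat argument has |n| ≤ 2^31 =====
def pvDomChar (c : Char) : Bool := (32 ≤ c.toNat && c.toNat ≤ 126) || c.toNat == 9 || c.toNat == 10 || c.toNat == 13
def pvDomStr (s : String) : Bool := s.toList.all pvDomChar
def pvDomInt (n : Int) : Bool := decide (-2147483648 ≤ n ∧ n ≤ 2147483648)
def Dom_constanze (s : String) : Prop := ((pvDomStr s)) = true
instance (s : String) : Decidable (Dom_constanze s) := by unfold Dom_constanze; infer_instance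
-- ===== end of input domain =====

-- B replaces A's whole-string DP array (driven by per-index two-character slices) by a single
-- run-segmentation pass: each maximal run of equal decodable letters contributes a Fibonacci
-- tiling factor (mod 1e9+7). Objective: faster by a constant factor (no array, no slices).

-- ===== PORT A =====
def constanze (s : String) : Int :=
  let cs := s.toList
  let MOD : Int := 10 ^ 9 + 7
  if cs.any (fun v => v == 'm' || v == 'w') then 0
  else
    let arr := (PySem.List.pyRange 2 ((cs.length : Int) + 1) 1).foldl
      (fun arr i =>
        if PySem.Chars.slice cs (some (i - 2)) (some i) = ['n', 'n'] ∨
           PySem.Chars.slice cs (some (i - 2)) (some i) = ['u', 'u'] then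
          PySem.List.pySetD arr i ((PySem.List.pyGetD arr (i - 1) 0 + PySem.List.pyGetD arr (i - 2) 0) % MOD)
        else
          PySem.List.pySetD arr i (PySem.List.pyGetD arr (i - 1) 0))
      (List.replicate (cs.length + 1) 1)
    PySem.List.pyGetD arr (cs.length : Int) 0

-- ===== PORT B =====
-- the inner 'a, b = b, (a+b) % MOD' loop of Source B
def fibRun (MOD a b : Int) : Nat → Int
  | 0 => b
  | k + 1 => fibRun MOD b ((a + b) % MOD) k

-- Source B's inner while: count of leading chars equal to c, and the remaining suffix
def takeRun (c : Char) : List Char → Nat × List Char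
  | [] => (0, [])
  | d :: rest => if d = c then ((takeRun c rest).1 + 1, (takeRun c rest).2) else (0, d :: rest)

lemma takeRun_len_le (c : Char) : ∀ l : List Char, (takeRun c l).2.length ≤ l.length := by
  intro l
  induction l with
  | nil => simp [takeRun]
  | cons d rest ih =>
    by_cases h : d = c <;> simp [takeRun, h]
    omega

-- Source B's outer while loop: one iteration per maximal run
def runsProd (MOD ans : Int) : List Char → Int
  | [] => ans
  | c :: rest =>
    runsProd MOD
      (if c = 'n' ∨ c = 'u' then ans * fibRun MOD 1 1 (takeRun c rest).1 % MOD else ans)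
      (takeRun c rest).2
  termination_by l => l.length
  decreasing_by exact Nat.lt_succ_of_le (takeRun_len_le c rest)

def constanze_alt (s : String) : Int :=
  let MOD : Int := 10 ^ 9 + 7
  if PySem.Str.isIn "m" s || PySem.Str.isIn "w" s then 0
  else runsProd MOD 1 s.toList

-- ===== PRECONDITION & SPEC =====
def Spec_constanze (s : String) (out : Int) : Prop := out = constanze_alt s
instance (s : String) (out : Int) : Decidable (Spec_constanze s out) := by unfold Spec_constanze; infer_instance

-- ===== CLAIM (what is proved, stated in full; the proofs are below) =====
def Claim_equal_constanze : Prop := ∀ (s : String), Dom_constanze s → Spec_constanze s (constanze s)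

-- ===== LEMMAS AND PROOFS =====

-- the reference DP value: dpv M cs i = A's arr[i]
def dpv (M : Int) (cs : List Char) : Nat → Int
  | 0 => 1
  | 1 => 1
  | (i + 2) =>
    if (cs[i]? = some 'n' ∧ cs[i + 1]? = some 'n') ∨ (cs[i]? = some 'u' ∧ cs[i + 1]? = some 'u')
    then (dpv M cs (i + 1) + dpv M cs i) % M
    else dpv M cs (i + 1)

lemma dpv_range (M : Int) (hM : 1 < M) (cs : List Char) :
    ∀ i : Nat, 0 ≤ dpv M cs i ∧ dpv M cs i < M := by
  intro i
  induction i using dpv.induct cs with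
  | case1 => simp [dpv]; omega
  | case2 => simp [dpv]; omega
  | case3 i h ih1 ih2 =>
    simp only [dpv, if_pos h]
    constructor
    · exact Int.emod_nonneg _ (by omega)
    · exact Int.emod_lt_of_pos _ (by omega)
  | case4 i h ih1 => simpa [dpv, if_neg h] using ih1

-- take 2 of a list is a given pair iff the first two optional elements are those values
lemma take_two_eq_pair {α : Type} (l : List α) (a b : α) :
    l.take 2 = [a, b] ↔ l[0]? = some a ∧ l[1]? = some b := by
  match l with
  | [] => simp
  | [x] => simp
  | x :: y :: r => simp [List.take_succ_cons, And.comm]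

-- inside a run of the letter c ∈ {n,u}, the DP follows the fibRun pair recurrence
lemma run_dp (M : Int) (cs : List Char) (c : Char) (hc : c = 'n' ∨ c = 'u') (P : Int) :
    ∀ (k p : Nat) (a b : Int),
      (∀ u : Nat, u ≤ k → cs[p + u]? = some c) →
      dpv M cs p = P * a % M → dpv M cs (p + 1) = P * b % M →
      dpv M cs (p + 1 + k) = P * fibRun M a b k % M := by
  intro k
  induction k with
  | zero => intro p a b _ _ hb; simpa [fibRun] using hb
  | succ k ih =>
    intro p a b hrun ha hb
    have h0 : cs[p]? = some c := by simpa using hrun 0 (by omega)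
    have h1 : cs[p + 1]? = some c := by simpa using hrun 1 (by omega)
    have hcond : (cs[p]? = some 'n' ∧ cs[p + 1]? = some 'n') ∨
        (cs[p]? = some 'u' ∧ cs[p + 1]? = some 'u') := by
      rcases hc with h | h <;> subst h
      · exact Or.inl ⟨h0, h1⟩
      · exact Or.inr ⟨h0, h1⟩
    have hstep : dpv M cs (p + 2) = P * ((a + b) % M) % M := by
      have : dpv M cs (p + 2) = (dpv M cs (p + 1) + dpv M cs p) % M := by
        simp [dpv, hcond]
      rw [this, ha, hb]
      calc (P * b % M + P * a % M) % M
          = (P * b + P * a) % M := by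
              conv_rhs => rw [Int.add_emod]
        _ = P * (a + b) % M := by ring_nf
        _ = P * ((a + b) % M) % M := by
              conv_rhs => rw [Int.mul_emod, Int.emod_emod_of_dvd _ dvd_rfl, ← Int.mul_emod]
    have hrun' : ∀ u : Nat, u ≤ k → cs[(p + 1) + u]? = some c := by
      intro u hu
      have := hrun (u + 1) (by omega)
      simpa [Nat.add_assoc, Nat.add_comm 1 u] using this
    have := ih (p + 1) b ((a + b) % M) hrun' hb hstep
    simpa [fibRun, Nat.add_assoc, Nat.add_comm, Nat.add_left_comm] using this

-- inside a run of a letter that is not n or u the DP is constant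
lemma run_flat (M : Int) (cs : List Char) (c : Char) (hc : ¬(c = 'n' ∨ c = 'u')) :
    ∀ (k p : Nat), (∀ u : Nat, u ≤ k → cs[p + u]? = some c) →
      dpv M cs (p + 1 + k) = dpv M cs (p + 1) := by
  intro k
  induction k with
  | zero => intro p _; rfl
  | succ k ih =>
    intro p hrun
    have h0 : cs[p]? = some c := by simpa using hrun 0 (by omega)
    have hcond : ¬((cs[p]? = some 'n' ∧ cs[p + 1]? = some 'n') ∨
        (cs[p]? = some 'u' ∧ cs[p + 1]? = some 'u')) := by
      rintro (⟨h, -⟩ | ⟨h, -⟩) <;> rw [h0] at h <;> simp_all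
    have hstep : dpv M cs (p + 2) = dpv M cs (p + 1) := by simp [dpv, hcond]
    have hrun' : ∀ u : Nat, u ≤ k → cs[(p + 1) + u]? = some c := by
      intro u hu; simpa [Nat.add_assoc, Nat.add_comm 1 u] using hrun (u + 1) (by omega)
    have := ih (p + 1) hrun'
    rw [show p + 1 + (k + 1) = (p + 1) + 1 + k by omega, this, hstep]

lemma takeRun_spec (c : Char) : ∀ l : List Char,
    l = List.replicate (takeRun c l).1 c ++ (takeRun c l).2 ∧
    (∀ d : Char, (takeRun c l).2.head? = some d → d ≠ c) := by
  intro l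
  induction l with
  | nil => simp [takeRun]
  | cons d rest ih =>
    by_cases h : d = c
    · subst h
      refine ⟨?_, by simpa [takeRun] using ih.2⟩
      simp only [takeRun, List.replicate_succ, List.cons_append, if_true, List.cons.injEq,
        true_and]
      exact ih.1
    · refine ⟨by simp [takeRun, h], ?_⟩
      intro e he
      simp [takeRun, h] at he
      simp [← he, h]

-- at a run boundary the DP copies its previous value
lemma dpv_boundary (M : Int) (cs : List Char) (pre rest : List Char) (c : Char)
    (hcs : cs = pre ++ c :: rest)
    (hb : ∀ d : Char, pre.getLast? = some d → d ≠ c) :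
    dpv M cs (pre.length + 1) = dpv M cs pre.length := by
  cases hpre : pre with
  | nil => subst hpre; simp [dpv]
  | cons x xs =>
    have hlen : pre.length = xs.length + 1 := by rw [hpre]; simp
    have hc0 : cs[pre.length]? = some c := by
      rw [hcs, List.getElem?_append_right (le_refl _)]
      simp
    have hlast : cs[xs.length]? = pre.getLast? := by
      rw [hcs, List.getElem?_append_left (by omega), List.getLast?_eq_getElem?, hlen]
      simp
    have hne : cs[xs.length]? ≠ some c := by
      rw [hlast]; exact fun h => hb c h rfl
    have hcond : ¬((cs[xs.length]? = some 'n' ∧ cs[xs.length + 1]? = some 'n') ∨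
        (cs[xs.length]? = some 'u' ∧ cs[xs.length + 1]? = some 'u')) := by
      rintro (⟨h1, h2⟩ | ⟨h1, h2⟩) <;>
      · rw [show xs.length + 1 = pre.length by omega, hc0] at h2
        injection h2 with h2
        subst h2
        exact hne h1
    have hdp : dpv M cs (xs.length + 2) = dpv M cs (xs.length + 1) := by simp [dpv, hcond]
    simp only [List.length_cons]
    exact hdp

-- B's run loop computes the DP value of the whole string
lemma runsProd_dp (M : Int) (hM : 1 < M) (cs : List Char) :
    ∀ (N : Nat) (rest pre : List Char), rest.length ≤ N →
      cs = pre ++ rest →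
      (∀ d : Char, rest.head? = some d → pre.getLast? ≠ some d) →
      runsProd M (dpv M cs pre.length) rest = dpv M cs cs.length := by
  intro N
  induction N with
  | zero =>
    intro rest pre hlen hcs _
    have h : rest = [] := List.eq_nil_of_length_eq_zero (by omega)
    subst h
    simp [runsProd, hcs]
  | succ N ih =>
    intro rest pre hlen hcs hbd
    match rest with
    | [] => simp [runsProd, hcs]
    | c :: tail =>
      have hlen' : tail.length + 1 ≤ N + 1 := by simpa using hlen
      have hspec := takeRun_spec c tail
      have hlen2 := takeRun_len_le c tail
      set k := (takeRun c tail).1 with hk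
      set r := (takeRun c tail).2 with hr
      have hcs' : cs = (pre ++ c :: List.replicate k c) ++ r := by
        rw [hcs]
        conv_lhs => rw [hspec.1]
        simp
      have hchars : ∀ u : Nat, u ≤ k → cs[pre.length + u]? = some c := by
        intro u hu
        rw [hcs', List.getElem?_append_left (by simp; omega),
            List.getElem?_append_right (by omega)]
        have : (c :: List.replicate k c) = List.replicate (k + 1) c := by
          simp [List.replicate_succ]
        rw [this, Nat.add_sub_cancel_left, List.getElem?_replicate, if_pos (by omega)]
      have hbound : dpv M cs (pre.length + 1) = dpv M cs pre.length := by
        refine dpv_boundary M cs pre tail c hcs (fun d hd hdc => ?_)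
        subst hdc
        exact hbd d rfl (by rw [hd])
      set P := dpv M cs pre.length with hP
      have hPrange := dpv_range M hM cs pre.length
      have hplen : (pre ++ c :: List.replicate k c).length = pre.length + 1 + k := by
        simp; omega
      have hlast' : (pre ++ c :: List.replicate k c).getLast? = some c := by
        have h1 : (c :: List.replicate k c).getLast? = some c := by
          have : (c :: List.replicate k c) = List.replicate (k + 1) c := by
            simp [List.replicate_succ]
          rw [this, List.getLast?_replicate]
          simp
        rw [List.getLast?_append, h1]
        simp
      have hbd' : ∀ d : Char, r.head? = some d → (pre ++ c :: List.replicate k c).getLast? ≠ some d := by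
        intro d hd
        rw [hlast']
        intro h
        exact hspec.2 d hd (Option.some_injective _ h).symm
      have hrlen : r.length ≤ N := by omega
      have hplen' : pre.length + 1 + k = (pre ++ c :: List.replicate k c).length := hplen.symm
      by_cases hc : c = 'n' ∨ c = 'u'
      · have hPa : dpv M cs pre.length = P * 1 % M := by
          rw [mul_one, Int.emod_eq_of_lt hPrange.1 hPrange.2]
        have hPb : dpv M cs (pre.length + 1) = P * 1 % M := by rw [hbound]; exact hPa
        have hrun := run_dp M cs c hc P k pre.length 1 1 hchars hPa hPb
        have hstep : runsProd M P (c :: tail) = runsProd M (P * fibRun M 1 1 k % M) r := by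
          rw [runsProd, if_pos hc, ← hk, ← hr]
        rw [hstep]
        have := ih r (pre ++ c :: List.replicate k c) hrlen hcs' hbd'
        rw [hplen, hrun] at this
        exact this
      · have hflat := run_flat M cs c hc k pre.length hchars
        have hstep : runsProd M P (c :: tail) = runsProd M P r := by
          rw [runsProd, if_neg hc, ← hr]
        rw [hstep]
        have := ih r (pre ++ c :: List.replicate k c) hrlen hcs' hbd'
        rw [hplen, hflat, hbound] at this
        exact this

-- A's index loop maintains: positions below j hold the DP values, the rest still hold 1
lemma foldA (M : Int) (cs : List Char) :
    ∀ j : Nat, 2 ≤ j → j ≤ cs.length + 1 →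
      (PySem.List.pyRange 2 (j : Int)).foldl
        (fun arr i =>
          if PySem.Chars.slice cs (some (i - 2)) (some i) = ['n', 'n'] ∨
             PySem.Chars.slice cs (some (i - 2)) (some i) = ['u', 'u'] then
            PySem.List.pySetD arr i
              ((PySem.List.pyGetD arr (i - 1) 0 + PySem.List.pyGetD arr (i - 2) 0) % M)
          else
            PySem.List.pySetD arr i (PySem.List.pyGetD arr (i - 1) 0))
        (List.replicate (cs.length + 1) 1)
      = (List.range j).map (dpv M cs) ++ List.replicate (cs.length + 1 - j) 1 := by
  intro j hj
  induction j, hj using Nat.le_induction with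
  | base =>
    intro _
    rw [PySem.List.pyRange_one_eq_nil (by norm_num)]
    have h2 : cs.length + 1 = 2 + (cs.length + 1 - 2) := by omega
    conv_lhs => rw [h2]
    simp [List.foldl_nil, List.replicate_add, List.range_succ, dpv]
  | succ j hj ih =>
    intro hj2
    have hjn : j ≤ cs.length := by omega
    have ihr := ih (by omega)
    have hcast : ((j + 1 : Nat) : Int) = (j : Int) + 1 := by push_cast; ring
    rw [hcast, PySem.List.pyRange_one_succ_right (by omega), List.foldl_append, ihr]
    set D := (List.range j).map (dpv M cs) with hD
    have hDlen : D.length = j := by simp [hD]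
    simp only [List.foldl_cons, List.foldl_nil]
    have e2 : (j : Int) - 2 = ((j - 2 : Nat) : Int) := by push_cast [hj]; ring
    have e1 : (j : Int) - 1 = ((j - 1 : Nat) : Int) := by push_cast [show 1 ≤ j by omega]; ring
    have hslice : PySem.Chars.slice cs (some ((j : Int) - 2)) (some (j : Int))
        = (cs.drop (j - 2)).take 2 := by
      have h := PySem.List.slice_natCast cs (j - 2) j
      rw [show j - (j - 2) = 2 by omega] at h
      rw [e2]
      exact h
    have hget1 : PySem.List.pyGetD (D ++ List.replicate (cs.length + 1 - j) 1) ((j : Int) - 1) 0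
        = dpv M cs (j - 1) := by
      rw [e1, PySem.List.pyGetD_natCast,
          List.getD_eq_getElem _ _ (by simp [hDlen]; omega),
          List.getElem_append_left (by omega)]
      simp [hD, List.getElem_map, List.getElem_range]
    have hget2 : PySem.List.pyGetD (D ++ List.replicate (cs.length + 1 - j) 1) ((j : Int) - 2) 0
        = dpv M cs (j - 2) := by
      rw [e2, PySem.List.pyGetD_natCast,
          List.getD_eq_getElem _ _ (by simp [hDlen]; omega),
          List.getElem_append_left (by omega)]
      simp [hD, List.getElem_map, List.getElem_range]
    have hset : ∀ v : Int, PySem.List.pySetD (D ++ List.replicate (cs.length + 1 - j) 1) (j : Int) v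
        = D ++ v :: List.replicate (cs.length - j) 1 := by
      intro v
      rw [show ((j : Nat) : Int) = ((j : Nat) : Int) from rfl, PySem.List.pySetD_natCast,
          List.set_append, if_neg (by omega), hDlen, Nat.sub_self,
          show cs.length + 1 - j = (cs.length - j) + 1 by omega, List.replicate_succ]
      simp
    have hcond : ((cs.drop (j - 2)).take 2 = ['n', 'n'] ∨ (cs.drop (j - 2)).take 2 = ['u', 'u'])
        ↔ ((cs[j - 2]? = some 'n' ∧ cs[j - 1]? = some 'n') ∨
           (cs[j - 2]? = some 'u' ∧ cs[j - 1]? = some 'u')) := by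
      rw [take_two_eq_pair, take_two_eq_pair, List.getElem?_drop, List.getElem?_drop,
          show j - 2 + 0 = j - 2 by omega, show j - 2 + 1 = j - 1 by omega]
    have hdpj : dpv M cs j = if (cs[j - 2]? = some 'n' ∧ cs[j - 1]? = some 'n') ∨
        (cs[j - 2]? = some 'u' ∧ cs[j - 1]? = some 'u') then
          (dpv M cs (j - 1) + dpv M cs (j - 2)) % M
        else dpv M cs (j - 1) := by
      conv_lhs => rw [show j = (j - 2) + 2 by omega]
      rw [dpv, show j - 2 + 1 = j - 1 by omega]
    have hD' : (List.range (j + 1)).map (dpv M cs) = D ++ [dpv M cs j] := by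
      rw [hD, List.range_succ]
      simp
    rw [hslice, hget1, hget2]
    by_cases hc : (cs[j - 2]? = some 'n' ∧ cs[j - 1]? = some 'n') ∨
        (cs[j - 2]? = some 'u' ∧ cs[j - 1]? = some 'u')
    · rw [if_pos (hcond.mpr hc), hset, hD', hdpj, if_pos hc]
      simp [show cs.length + 1 - (j + 1) = cs.length - j by omega]
    · rw [if_neg (fun h => hc (hcond.mp h)), hset, hD', hdpj, if_neg hc]
      simp [show cs.length + 1 - (j + 1) = cs.length - j by omega]

-- the singleton-substring guards of A and B test the same thing
lemma isIn_single (c : Char) (sub s : String) (h : sub.toList = [c]) :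
    PySem.Str.isIn sub s = s.toList.any (· == c) := by
  rw [Bool.eq_iff_iff, PySem.Str.isIn_iff_infix, h, List.any_eq_true]
  constructor
  · intro hinf
    exact ⟨c, List.singleton_sublist.mp hinf.sublist, by simp⟩
  · rintro ⟨d, hd, hdc⟩
    have : d = c := by simpa using hdc
    subst this
    obtain ⟨u, v, huv⟩ := List.append_of_mem hd
    rw [huv]
    exact ⟨u, v, by simp⟩

theorem constanze_spec : Claim_equal_constanze := by
  intro s _
  show constanze s = constanze_alt s
  have hM : (1 : Int) < 10 ^ 9 + 7 := by norm_num
  simp only [constanze, constanze_alt]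
  rw [isIn_single 'm' "m" s (by decide), isIn_single 'w' "w" s (by decide)]
  by_cases hg : (s.toList.any fun v => v == 'm' || v == 'w') = true
  · have hB : (s.toList.any (· == 'm') || s.toList.any (· == 'w')) = true := by
      obtain ⟨v, hv, hvo⟩ := List.any_eq_true.mp hg
      have : v = 'm' ∨ v = 'w' := by simpa using hvo
      rcases this with rfl | rfl
      · exact (Bool.or_eq_true _ _).mpr (Or.inl (List.any_eq_true.mpr ⟨'m', hv, by simp⟩))
      · exact (Bool.or_eq_true _ _).mpr (Or.inr (List.any_eq_true.mpr ⟨'w', hv, by simp⟩))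
    rw [if_pos hg, if_pos hB]
  · have hB : ¬ ((s.toList.any (· == 'm') || s.toList.any (· == 'w')) = true) := by
      intro h
      apply hg
      rcases (Bool.or_eq_true _ _).mp h with h | h <;>
        obtain ⟨v, hv, hb⟩ := List.any_eq_true.mp h <;>
        refine List.any_eq_true.mpr ⟨v, hv, ?_⟩ <;>
        simp at hb <;> simp [hb]
    rw [if_neg hg, if_neg hB]
    have hrp : runsProd (10 ^ 9 + 7) 1 s.toList = dpv (10 ^ 9 + 7) s.toList s.toList.length := by
      have h := runsProd_dp (10 ^ 9 + 7) hM s.toList s.toList.length s.toList []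
        (le_refl _) (by simp) (by simp)
      have h1 : dpv (10 ^ 9 + 7) s.toList (List.length ([] : List Char)) = 1 := by simp [dpv]
      rwa [h1] at h
    rcases Nat.eq_zero_or_pos s.toList.length with h0 | h1
    · have hnil : s.toList = [] := List.eq_nil_of_length_eq_zero h0
      rw [hnil]
      simp only [List.length_nil, Nat.cast_zero, zero_add]
      rw [PySem.List.pyRange_one_eq_nil (by norm_num)]
      simp only [List.foldl_nil]
      rw [show (0 : Int) = ((0 : Nat) : Int) from rfl, PySem.List.pyGetD_natCast]
      simp [runsProd]
    · have hf := foldA (10 ^ 9 + 7) s.toList (s.toList.length + 1) (by omega) (le_refl _)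
      rw [show ((s.toList.length : Int) + 1) = (((s.toList.length + 1 : Nat)) : Int) by
        push_cast; ring]
      rw [hf, hrp]
      rw [show s.toList.length + 1 - (s.toList.length + 1) = 0 by omega]
      simp only [List.replicate_zero, List.append_nil]
      rw [PySem.List.pyGetD_natCast,
          List.getD_eq_getElem _ _ (by simp)]
      simp [List.getElem_map, List.getElem_range]
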